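-- pv_equiv track=rewrite | github.com/jonasleitner/adcgen | indices.py | split_idxstring
-- ===== SOURCE A (Python) =====
-- def split_idxstring(string_tosplit):
--     """Splits an index string of the form ij12a3b in a list
--        [i,j12,a3,b]
--        """
--
--     separated = []
--     temp = []
--     for i, idx in enumerate(string_tosplit):
--         temp.append(idx)
--         if i+1 < len(string_tosplit):
--             if string_tosplit[i+1].isdigit():
--                 continue
--             else:
--                 separated.append("".join(temp))
--                 temp.clear()
--         else:
--             separated.append("".join(temp))
--     return separated
-- ===== SOURCE B (Python) =====
-- def split_idxstring(string_tosplit):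
--     """Splits an index string of the form ij12a3b in a list
--        [i,j12,a3,b]
--        """
--     tokens = []
--     i, n = 0, len(string_tosplit)
--     while i < n:
--         j = i + 1
--         while j < n and string_tosplit[j].isdigit():
--             j += 1
--         tokens.append(string_tosplit[i:j])
--         i = j
--     return tokens
-- ===== Notes on version B (the rewrite author's own statement) =====
-- stated objective: alternative
-- what changed: Replaces A's accumulate-and-flush character loop (temp buffer + s[i+1] lookahead + join per token) with a cursor scanner that, at each token start, scans the following digit run and emits the token as one slice.
import Mathlib
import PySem

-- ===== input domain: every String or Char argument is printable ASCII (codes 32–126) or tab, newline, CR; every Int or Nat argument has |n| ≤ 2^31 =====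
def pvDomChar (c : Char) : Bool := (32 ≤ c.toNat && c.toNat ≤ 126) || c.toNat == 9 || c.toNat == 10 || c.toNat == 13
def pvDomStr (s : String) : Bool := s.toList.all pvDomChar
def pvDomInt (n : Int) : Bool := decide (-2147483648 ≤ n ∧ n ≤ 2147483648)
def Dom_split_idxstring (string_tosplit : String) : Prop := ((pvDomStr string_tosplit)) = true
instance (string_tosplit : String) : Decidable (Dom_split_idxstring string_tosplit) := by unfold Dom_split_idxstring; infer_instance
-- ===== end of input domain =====

-- B replaces A's accumulate-and-flush loop (lookahead s[i+1], temp buffer) by a cursor scanner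
-- that emits each token whole (head char + following digit run); alternative decomposition, same cost.

-- ===== PORT A =====
-- loop body of A: temp.append(idx); flush on lookahead / at the end
def aStep (cs : List Char) (st : List String × List Char) (ic : Int × Char) :
    List String × List Char :=
  let temp := st.2 ++ [ic.2]
  if ic.1 + 1 < (cs.length : Int) then
    if PySem.Chars.isdigit (PySem.List.pyGetD cs (ic.1 + 1) ' ') then (st.1, temp)
    else (st.1 ++ [String.ofList temp], [])
  else (st.1 ++ [String.ofList temp], [])

def split_idxstring (string_tosplit : String) : List String :=
  ((PySem.List.enumerate string_tosplit.toList 0).foldl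
    (aStep string_tosplit.toList) ([], [])).1

-- ===== PORT B =====
-- Source B's outer while advances a cursor i over the string; here the suffix string_tosplit[i:]
-- is the recursion argument; the inner digit-scan 'while j < n and s[j].isdigit(): j += 1'
-- is the takeWhile on the characters after the head, s[i:j] the emitted token, i = j the drop.
def bGo : List Char → List (List Char)
  | [] => []
  | c :: rest =>
      let ds := rest.takeWhile PySem.Chars.isdigit
      (c :: ds) :: bGo (rest.drop ds.length)
termination_by l => l.length
decreasing_by simp [List.length_drop]

def split_idxstring_alt (string_tosplit : String) : List String :=
  (bGo string_tosplit.toList).map String.ofList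

-- ===== PRECONDITION & SPEC =====
def Spec_split_idxstring (string_tosplit : String) (out : List String) : Prop := out = split_idxstring_alt string_tosplit
instance (string_tosplit : String) (out : List String) : Decidable (Spec_split_idxstring string_tosplit out) := by unfold Spec_split_idxstring; infer_instance

-- ===== CLAIM (what is proved, stated in full; the proofs are below) =====
def Claim_equal_split_idxstring : Prop := ∀ (string_tosplit : String), Dom_split_idxstring string_tosplit → Spec_split_idxstring string_tosplit (split_idxstring string_tosplit)

-- ===== LEMMAS AND PROOFS =====

lemma bGo_nil : bGo [] = [] := by rw [bGo.eq_def]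

lemma bGo_cons (c : Char) (rest : List Char) :
    bGo (c :: rest)
      = (c :: rest.takeWhile PySem.Chars.isdigit)
          :: bGo (rest.drop (rest.takeWhile PySem.Chars.isdigit).length) := by
  rw [bGo.eq_def]

-- direct recursive description of A's loop: g temp rest = tokens still to be appended,
-- starting with buffer temp and remaining characters rest
def g : List Char → List Char → List (List Char)
  | _, [] => []
  | temp, [c] => [temp ++ [c]]
  | temp, c :: d :: rest =>
      if PySem.Chars.isdigit d then g (temp ++ [c]) (d :: rest)
      else (temp ++ [c]) :: g [] (d :: rest)

lemma foldl_aStep_eq_g (rest : List Char) :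
    ∀ (pre : List Char) (sep : List String) (temp : List Char),
      ((PySem.List.enumerate rest (pre.length : Int)).foldl (aStep (pre ++ rest)) (sep, temp)).1
        = sep ++ (g temp rest).map String.ofList := by
  induction rest with
  | nil => intro pre sep temp; simp [PySem.List.enumerate, g]
  | cons c rest2 ih =>
      intro pre sep temp
      rw [PySem.List.enumerate_cons]
      cases rest2 with
      | nil =>
          have hguard : ¬ ((pre.length : Int) + 1 < ((pre ++ [c]).length : Int)) := by
            simp
          simp [aStep, g, hguard, PySem.List.enumerate]
      | cons d rest3 =>
          have hguard : ((pre.length : Int) + 1 < ((pre ++ c :: d :: rest3).length : Int)) := by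
            simp
          have hidx : PySem.List.pyGetD (pre ++ c :: d :: rest3) ((pre.length : Int) + 1) ' ' = d := by
            have h1 : ((pre.length : Int) + 1) = ((pre.length + 1 : Nat) : Int) := by omega
            rw [h1, PySem.List.pyGetD_natCast]
            rw [List.getD_eq_getElem?_getD, List.getElem?_append_right (by omega)]
            simp
          have hpre : pre ++ c :: d :: rest3 = (pre ++ [c]) ++ (d :: rest3) := by simp
          have hlen : (pre.length : Int) + 1 = (((pre ++ [c]).length : Nat) : Int) := by simp
          have hstep : aStep (pre ++ c :: d :: rest3) (sep, temp) ((pre.length : Int), c)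
              = (if PySem.Chars.isdigit d then (sep, temp ++ [c])
                 else (sep ++ [String.ofList (temp ++ [c])], ([] : List Char))) := by
            simp [aStep, hguard, hidx]
          simp only [List.foldl_cons, hstep]
          by_cases hd : PySem.Chars.isdigit d
          · rw [if_pos hd, hlen, hpre, ih (pre ++ [c]) sep (temp ++ [c])]
            simp [g, hd]
          · rw [if_neg hd, hlen, hpre,
                ih (pre ++ [c]) (sep ++ [String.ofList (temp ++ [c])]) []]
            simp [g, hd]

lemma g_cons_eq (rest : List Char) :
    ∀ (temp : List Char) (c : Char),
      g temp (c :: rest)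
        = (temp ++ c :: rest.takeWhile PySem.Chars.isdigit)
            :: bGo (rest.drop (rest.takeWhile PySem.Chars.isdigit).length) := by
  induction rest with
  | nil => intro temp c; simp [g, bGo_nil]
  | cons d rest3 ih =>
      intro temp c
      by_cases hd : PySem.Chars.isdigit d
      · rw [show g temp (c :: d :: rest3) = g (temp ++ [c]) (d :: rest3) by simp [g, hd]]
        rw [ih (temp ++ [c]) d]
        simp [hd]
      · rw [show g temp (c :: d :: rest3) = (temp ++ [c]) :: g [] (d :: rest3) by simp [g, hd]]
        rw [ih [] d]
        simp [hd, bGo_cons]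

lemma g_nil_eq (cs : List Char) : g [] cs = bGo cs := by
  cases cs with
  | nil => simp [g, bGo_nil]
  | cons c rest => rw [g_cons_eq rest [] c, bGo_cons]; simp

-- ===== VERDICT (by name: the statement is the Claim_ definition above) =====
theorem split_idxstring_spec : Claim_equal_split_idxstring := by
  intro s _
  unfold Spec_split_idxstring split_idxstring split_idxstring_alt
  have h := foldl_aStep_eq_g s.toList [] [] []
  simpa [g_nil_eq] using h
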